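-- pv_equiv track=rewrite | github.com/ravnjak01/protein-visualizer | viewer/analysis.py | smooth_secondary_structure
-- ===== SOURCE A (Python) =====
-- def smooth_secondary_structure(ss_assignment, min_length=3):
--     """Gladi dodeljivanje sekundarne strukture - uklanja kratke segmente"""
--     smoothed = ss_assignment.copy()
--
--     # Ukloni kratke helix i sheet segmente
--     i = 0
--     while i < len(smoothed):
--         if smoothed[i] in ['H', 'E']:
--             # Nađi kraj ovog segmenta
--             j = i
--             while j < len(smoothed) and smoothed[j] == smoothed[i]:
--                 j += 1
--
--             # Ako je segment kraći od min_length, promeni u coil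
--             if j - i < min_length:
--                 for k in range(i, j):
--                     smoothed[k] = 'C'
--             i = j
--         else:
--             i += 1
--
--     return smoothed
-- ===== SOURCE B (Python) =====
-- def smooth_secondary_structure(ss_assignment, min_length=3):
--     # Pass 1: run-length encode the assignment.
--     runs = []
--     for s in ss_assignment:
--         if runs and runs[-1][0] == s:
--             runs[-1][1] += 1
--         else:
--             runs.append([s, 1])
--     # Pass 2: expand runs, turning short H/E runs into coil.
--     out = []
--     for v, n in runs:
--         out.extend(['C'] * n if v in ('H', 'E') and n < min_length else [v] * n)
--     return out
-- ===== Notes on version B (the rewrite author's own statement) =====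
-- stated objective: alternative
-- what changed: Replaces A's in-place index-advancing while loop (inner scan to find each segment end, then a rewrite loop over its indices) by a two-pass shape: run-length encode the list, then expand each (value, length) group, coiling H/E groups shorter than min_length.
import Mathlib
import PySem

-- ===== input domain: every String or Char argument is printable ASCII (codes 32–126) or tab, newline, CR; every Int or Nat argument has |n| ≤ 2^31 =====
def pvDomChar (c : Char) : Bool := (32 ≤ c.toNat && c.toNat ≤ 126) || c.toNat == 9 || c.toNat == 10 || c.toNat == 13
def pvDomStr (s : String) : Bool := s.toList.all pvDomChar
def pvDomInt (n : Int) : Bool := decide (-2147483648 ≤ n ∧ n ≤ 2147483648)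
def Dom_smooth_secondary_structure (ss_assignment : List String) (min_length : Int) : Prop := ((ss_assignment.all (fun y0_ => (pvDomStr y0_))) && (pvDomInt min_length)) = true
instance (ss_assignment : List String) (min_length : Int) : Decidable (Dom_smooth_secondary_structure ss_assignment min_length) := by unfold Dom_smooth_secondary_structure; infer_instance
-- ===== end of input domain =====

-- B replaces A's in-place index-advancing while loop by a two-pass shape (run-length
-- encode, then expand, coiling short H/E runs); objective: alternative decomposition,
-- same cost.

-- ===== PORT A =====
-- A's while loop: each iteration either consumes a whole H/E run (indices i..j, the
-- run of equal values found by the inner while) and rewrites it to 'C' if short, or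
-- steps one position.  Ported as the corresponding recursion on the remaining suffix.
def smoothGo (l : List String) (m : Int) : List String :=
  match l with
  | [] => []
  | s :: rest =>
    if s = "H" ∨ s = "E" then
      -- inner while: j runs to the end of the segment of values equal to smoothed[i]
      let run := rest.takeWhile (fun t => t = s)
      let tail := rest.dropWhile (fun t => t = s)
      let n := run.length + 1
      (if (n : Int) < m then List.replicate n "C" else List.replicate n s) ++ smoothGo tail m
    else
      s :: smoothGo rest m
termination_by l.length
decreasing_by
  · have h := List.length_dropWhile_le (p := fun t => decide (t = s)) (l := rest)
    simp only [List.length_cons]; omega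
  · simp

def smooth_secondary_structure (ss_assignment : List String) (min_length : Int) : List String :=
  smoothGo ss_assignment min_length

-- ===== PORT B =====
-- Pass 1 step: Python keeps `runs` in order and updates runs[-1]; ported with the
-- runs list newest-first (updating/prepending the head), reversed before pass 2.
def rleStep (runs : List (String × Nat)) (s : String) : List (String × Nat) :=
  match runs with
  | (v, n) :: rest => if v = s then (v, n + 1) :: rest else (s, 1) :: (v, n) :: rest
  | [] => [(s, 1)]

-- Pass 2 step: out.extend(['C']*n if v in ('H','E') and n < min_length else [v]*n)
def expandStep (m : Int) (out : List String) (r : String × Nat) : List String :=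
  out ++ (if (r.1 = "H" ∨ r.1 = "E") ∧ (r.2 : Int) < m then List.replicate r.2 "C"
          else List.replicate r.2 r.1)

def smooth_secondary_structure_alt (ss_assignment : List String) (min_length : Int) : List String :=
  ((ss_assignment.foldl rleStep []).reverse).foldl (expandStep min_length) []

-- ===== PRECONDITION & SPEC =====
def Spec_smooth_secondary_structure (ss_assignment : List String) (min_length : Int) (out : List String) : Prop := out = smooth_secondary_structure_alt ss_assignment min_length
instance (ss_assignment : List String) (min_length : Int) (out : List String) : Decidable (Spec_smooth_secondary_structure ss_assignment min_length out) := by unfold Spec_smooth_secondary_structure; infer_instance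

-- ===== CLAIM (what is proved, stated in full; the proofs are below) =====
def Claim_equal_smooth_secondary_structure : Prop := ∀ (ss_assignment : List String) (min_length : Int), Dom_smooth_secondary_structure ss_assignment min_length → Spec_smooth_secondary_structure ss_assignment min_length (smooth_secondary_structure ss_assignment min_length)

-- ===== LEMMAS AND PROOFS =====

-- forward-order run-length encoding, takeWhile style (proof-only reference form)
def rle (l : List String) : List (String × Nat) :=
  match l with
  | [] => []
  | s :: rest =>
      (s, (rest.takeWhile (fun t => t = s)).length + 1) :: rle (rest.dropWhile (fun t => t = s))
termination_by l.length
decreasing_by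
  have h := List.length_dropWhile_le (p := fun t => decide (t = s)) (l := rest)
  simp only [List.length_cons]; omega

def expItem (m : Int) (r : String × Nat) : List String :=
  if (r.1 = "H" ∨ r.1 = "E") ∧ (r.2 : Int) < m then List.replicate r.2 "C"
  else List.replicate r.2 r.1

-- rleFrom v n l : the runs of (replicate n v ++ l) when the pending run is (v, n)
def rleFrom (v : String) (n : Nat) (l : List String) : List (String × Nat) :=
  match l with
  | [] => [(v, n)]
  | s :: t => if s = v then rleFrom v (n + 1) t else (v, n) :: rleFrom s 1 t

theorem foldl_rleStep (l : List String) : ∀ (v : String) (n : Nat) (rest : List (String × Nat)),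
    (List.foldl rleStep ((v, n) :: rest) l).reverse = rest.reverse ++ rleFrom v n l := by
  induction l with
  | nil => intro v n rest; simp [rleFrom]
  | cons s t ih =>
      intro v n rest
      simp only [List.foldl_cons, rleStep, rleFrom]
      by_cases h : v = s
      · subst h; simp [ih]
      · have h' : ¬ s = v := fun hc => h hc.symm
        simp only [if_neg h, if_neg h']
        rw [ih s 1 ((v, n) :: rest)]
        simp

theorem rleFrom_eq (l : List String) : ∀ (v : String) (n : Nat),
    rleFrom v n l = (v, (l.takeWhile (fun t => t = v)).length + n) :: rle (l.dropWhile (fun t => t = v)) := by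
  induction l with
  | nil => intro v n; simp [rleFrom, rle]
  | cons s t ih =>
      intro v n
      by_cases h : s = v
      · subst h
        simp only [rleFrom, List.takeWhile_cons, List.dropWhile_cons]
        rw [ih s (n + 1)]
        simp only [decide_true, if_true, List.length_cons]
        congr 2
        omega
      · simp only [rleFrom, List.takeWhile_cons, List.dropWhile_cons, decide_eq_true_eq,
          if_neg h]
        simp only [List.length_nil, Nat.zero_add]
        congr 1
        rw [ih s 1]
        simp [rle]

theorem foldl_rle_eq (l : List String) : (List.foldl rleStep [] l).reverse = rle l := by
  cases l with
  | nil => simp [rle]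
  | cons s t =>
      simp only [List.foldl_cons, rleStep]
      rw [foldl_rleStep t s 1 []]
      simp [rleFrom_eq, rle]

-- A's while loop walks element-by-element through a run of a non-H/E value
theorem smoothGo_const_prefix (run : List String) (s : String) (m : Int)
    (hall : ∀ x ∈ run, x = s) (hs : ¬ (s = "H" ∨ s = "E")) (tail : List String) :
    smoothGo (run ++ tail) m = run ++ smoothGo tail m := by
  induction run with
  | nil => simp
  | cons a t ih =>
      have ha : a = s := hall a (by simp)
      subst ha
      rw [List.cons_append, smoothGo, if_neg hs]
      simp only [List.cons_append]
      congr 1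
      exact ih (fun x hx => hall x (by simp [hx]))

theorem smoothGo_eq_flatMap (l : List String) (m : Int) :
    smoothGo l m = (rle l).flatMap (expItem m) := by
  induction hl : l.length using Nat.strong_induction_on generalizing l with
  | _ k ih =>
    cases l with
    | nil => simp [smoothGo, rle]
    | cons s rest =>
        subst hl
        rw [smoothGo, rle]
        simp only [List.flatMap_cons]
        by_cases hs : s = "H" ∨ s = "E"
        · rw [if_pos hs]
          have hlen := List.length_dropWhile_le (p := fun t => decide (t = s)) (l := rest)
          have := ih (rest.dropWhile (fun t => t = s)).length
            (by simp only [List.length_cons]; omega) _ rfl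
          rw [this]
          congr 1
          simp only [expItem]
          have hcast : (((List.takeWhile (fun t => decide (t = s)) rest).length + 1 : Nat) : Int)
              = ((List.takeWhile (fun t => decide (t = s)) rest).length : Int) + 1 := by push_cast; ring
          rw [hcast]
          by_cases hm : ((List.takeWhile (fun t => decide (t = s)) rest).length : Int) + 1 < m
          · rw [if_pos hm, if_pos ⟨hs, hm⟩]
          · rw [if_neg hm, if_neg (fun h => hm h.2)]
        · rw [if_neg hs]
          have hsplit : rest = rest.takeWhile (fun t => t = s) ++ rest.dropWhile (fun t => t = s) :=
            (List.takeWhile_append_dropWhile).symm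
          have hall : ∀ x ∈ rest.takeWhile (fun t => t = s), x = s := by
            intro x hx
            have := List.mem_takeWhile_imp hx
            simpa using this
          have hlen := List.length_dropWhile_le (p := fun t => decide (t = s)) (l := rest)
          have ihd := ih (rest.dropWhile (fun t => t = s)).length
            (by simp only [List.length_cons]; omega) _ rfl
          have hrw : smoothGo rest m
              = rest.takeWhile (fun t => t = s) ++ smoothGo (rest.dropWhile (fun t => t = s)) m := by
            conv_lhs => rw [hsplit]
            exact smoothGo_const_prefix _ s m hall hs _
          rw [hrw, ihd]
          have htw : rest.takeWhile (fun t => t = s)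
              = List.replicate (rest.takeWhile (fun t => t = s)).length s :=
            List.eq_replicate_of_mem hall
          have hcond : ¬ (((s, (rest.takeWhile (fun t => t = s)).length + 1).1 = "H" ∨
              (s, (rest.takeWhile (fun t => t = s)).length + 1).1 = "E") ∧
              (((s, (rest.takeWhile (fun t => t = s)).length + 1).2 : Int) < m)) := by
            intro h; exact hs h.1
          rw [expItem, if_neg hcond]
          conv_lhs => rw [htw]
          simp [List.replicate_succ]

-- ===== VERDICT (by name: the statement is the Claim_ definition above) =====
theorem smooth_secondary_structure_spec : Claim_equal_smooth_secondary_structure := by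
  intro xs m _
  unfold Spec_smooth_secondary_structure smooth_secondary_structure smooth_secondary_structure_alt
  rw [foldl_rle_eq]
  show smoothGo xs m = List.foldl (fun out r => out ++ expItem m r) [] (rle xs)
  rw [PySem.List.foldl_append_eq_flatMap, smoothGo_eq_flatMap]
  simp
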